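-- pv_equiv track=rewrite | github.com/jaysukh123/Solving_problems | python_coding_solution/01_Seating_arranagement_prob.py | is_valid_seating
-- ===== SOURCE A (Python) =====
-- def is_valid_seating(order, preferences):
--     """
--     Checks whether the given circular seating order satisfies all guests' neighbor preferences.
--
--     Parameters:
--     - order (list): A list representing a permutation of guests.
--     - preferences (dict): A dictionary mapping each guest to a list of two preferred neighbors.
--
--     Returns:
--     - bool: True if all guests are seated next to both of their preferred neighbors.
--     """
--     n = len(order)
--     for i in range(n):
--         guest = order[i]
--         left_neighbor = order[(i - 1) % n]    # Circular left neighbor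
--         right_neighbor = order[(i + 1) % n]   # Circular right neighbor
--
--         # Check if both preferred neighbors are adjacent (left or right)
--         if not (preferences[guest][0] in [left_neighbor, right_neighbor] and
--                 preferences[guest][1] in [left_neighbor, right_neighbor]):
--             return False  # Guest's preference not satisfied
--     return True  # All preferences satisfied
-- ===== SOURCE B (Python) =====
-- def is_valid_seating(order, preferences):
--     n = len(order)
--     neighbors = {}
--     for i, g in enumerate(order):
--         adj = {order[i - 1], order[(i + 1) % n]}
--         neighbors[g] = neighbors[g] & adj if g in neighbors else adj
--     for g in order:
--         p = preferences[g]
--         nb = neighbors[g]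
--         if p[0] not in nb or p[1] not in nb:
--             return False
--     return True
-- ===== Notes on version B (the rewrite author's own statement) =====
-- stated objective: alternative
-- what changed: A's single interleaved pass doing modular index arithmetic and per-position membership tests is replaced by two differently-shaped passes: first build a table mapping each guest to the intersection of the neighbor sets of all of its seats, then verify each guest's two preferred neighbors against that accumulated set.
import Mathlib
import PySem

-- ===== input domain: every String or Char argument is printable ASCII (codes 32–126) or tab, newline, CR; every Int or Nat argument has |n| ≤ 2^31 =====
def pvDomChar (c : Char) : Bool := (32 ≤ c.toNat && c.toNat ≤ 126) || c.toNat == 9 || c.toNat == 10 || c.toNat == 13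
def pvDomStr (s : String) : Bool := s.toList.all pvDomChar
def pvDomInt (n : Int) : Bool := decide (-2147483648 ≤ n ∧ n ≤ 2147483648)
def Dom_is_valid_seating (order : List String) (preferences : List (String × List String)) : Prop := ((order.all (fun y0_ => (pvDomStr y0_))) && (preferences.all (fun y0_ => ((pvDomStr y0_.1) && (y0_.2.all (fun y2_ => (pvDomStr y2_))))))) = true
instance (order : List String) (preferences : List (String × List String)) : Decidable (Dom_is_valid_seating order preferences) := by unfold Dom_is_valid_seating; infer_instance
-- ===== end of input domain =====

-- ===== PORT A =====
-- B replaces A's interleaved modular-index pass by building a per-guest neighbor-constraint table and then verifying memberships (objective: alternative); agrees with A wherever A returns.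
def isvsA_loop (order : List String) (preferences : List (String × List String)) (n : Int) : List Int → Bool
  | [] => true
  | i :: rest =>
    match PySem.List.pyGet? order i with
    | none => false
    | some guest =>
      match PySem.List.pyGet? order (PySem.Int.mod (i - 1) n),
            PySem.List.pyGet? order (PySem.Int.mod (i + 1) n) with
      | some left_neighbor, some right_neighbor =>
        match PySem.Dict.get? (PySem.Dict.mk preferences) guest with
        | none => false
        | some p =>
          match PySem.List.pyGet? p 0 with
          | none => false
          | some p0 =>
            if p0 == left_neighbor || p0 == right_neighbor then
              match PySem.List.pyGet? p 1 with
              | none => false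
              | some p1 =>
                if p1 == left_neighbor || p1 == right_neighbor then
                  isvsA_loop order preferences n rest
                else false
            else false
      | _, _ => false

def is_valid_seating (order : List String) (preferences : List (String × List String)) : Bool :=
  isvsA_loop order preferences (order.length : Int)
    (PySem.List.pyRange 0 (order.length : Int))

-- ===== PORT B =====
-- adj = {order[i-1], order[(i+1)%n]}; neighbors[g] = neighbors[g] & adj if g in neighbors else adj
-- (the fallthrough arm is unreachable: enumerate indices are in range)
def isvsB_step (order : List String) (n : Int)
    (d : PySem.Dict String (PySem.Set String)) (q : Int × String) :
    PySem.Dict String (PySem.Set String) :=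
  match PySem.List.pyGet? order (q.1 - 1),
        PySem.List.pyGet? order (PySem.Int.mod (q.1 + 1) n) with
  | some l, some r =>
    let adj := PySem.Set.ofList [l, r]
    match d.get? q.2 with
    | some s => d.insert q.2 (PySem.Set.inter s adj)
    | none => d.insert q.2 adj
  | _, _ => d

def isvsB_table (order : List String) : PySem.Dict String (PySem.Set String) :=
  (PySem.List.enumerate order 0).foldl (isvsB_step order (order.length : Int)) PySem.Dict.empty

-- p = preferences[g]; nb = neighbors[g]; if p[0] not in nb or p[1] not in nb: return False
def isvsB_check (neighbors : PySem.Dict String (PySem.Set String))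
    (preferences : List (String × List String)) : List String → Bool
  | [] => true
  | g :: rest =>
    match PySem.Dict.get? (PySem.Dict.mk preferences) g with
    | none => false
    | some p =>
      match PySem.Dict.get? neighbors g with
      | none => false
      | some nb =>
        match PySem.List.pyGet? p 0 with
        | none => false
        | some p0 =>
          if PySem.Set.contains nb p0 then
            match PySem.List.pyGet? p 1 with
            | none => false
            | some p1 =>
              if PySem.Set.contains nb p1 then isvsB_check neighbors preferences rest
              else false
          else false

def is_valid_seating_alt (order : List String) (preferences : List (String × List String)) : Bool :=
  isvsB_check (isvsB_table order) preferences order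

-- ===== PRECONDITION & SPEC =====
-- the membership test A performs at seat k: "x is one of the two circular neighbors of seat k"
def isvsMemPair (order : List String) (n i : Int) (x : String) : Bool :=
  match PySem.List.pyGet? order (PySem.Int.mod (i - 1) n),
        PySem.List.pyGet? order (PySem.Int.mod (i + 1) n) with
  | some l, some r => x == l || x == r
  | _, _ => false

-- "A's check at seat k returns False": the entry exists and a listed preferred neighbor fails the test
def isvsSeatFalse (order : List String) (preferences : List (String × List String)) (k : Nat) : Bool :=
  match PySem.Dict.get? (PySem.Dict.mk preferences) (order.getD k "") with
  | none => false
  | some l =>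
    match l[0]? with
    | none => false
    | some p0 =>
      if isvsMemPair order (order.length : Int) (k : Int) p0 then
        match l[1]? with
        | none => false
        | some p1 => !(isvsMemPair order (order.length : Int) (k : Int) p1)
      else true

-- "A raises at seat k (if it reaches it)": the entry is missing, or too short for the accesses made
def isvsSeatRaise (order : List String) (preferences : List (String × List String)) (k : Nat) : Bool :=
  match PySem.Dict.get? (PySem.Dict.mk preferences) (order.getD k "") with
  | none => true
  | some l =>
    match l[0]? with
    | none => true
    | some p0 =>
      if isvsMemPair order (order.length : Int) (k : Int) p0 then (l[1]?).isNone
      else false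

-- exactly the inputs on which Python A returns normally: every seat at which A would raise
-- (missing or too-short preference entry) is preceded by a seat at which A's check returns False
def Pre_is_valid_seating (order : List String) (preferences : List (String × List String)) : Prop :=
  ∀ k < order.length, isvsSeatRaise order preferences k = true →
    ∃ j < k, isvsSeatFalse order preferences j = true
instance (order : List String) (preferences : List (String × List String)) : Decidable (Pre_is_valid_seating order preferences) := by unfold Pre_is_valid_seating; infer_instance

def pvWitness_is_valid_seating : List String × (List (String × List String)) :=
  (["a", "b", "c"], [("a", ["b", "c"]), ("b", ["a", "c"]), ("c", ["a", "b"])])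

def Spec_is_valid_seating (order : List String) (preferences : List (String × List String)) (out : Bool) : Prop := out = is_valid_seating_alt order preferences
instance (order : List String) (preferences : List (String × List String)) (out : Bool) : Decidable (Spec_is_valid_seating order preferences out) := by unfold Spec_is_valid_seating; infer_instance

-- ===== CLAIM (what is proved, stated in full; the proofs are below) =====
def Claim_equal_is_valid_seating : Prop := ∀ (order : List String) (preferences : List (String × List String)), Dom_is_valid_seating order preferences → Pre_is_valid_seating order preferences → Spec_is_valid_seating order preferences (is_valid_seating order preferences)

-- ===== LEMMAS AND PROOFS =====

-- the shared per-guest condition, parametrized by the membership test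
def isvsCond (preferences : List (String × List String)) (g : String) (mem : String → Bool) : Bool :=
  match PySem.Dict.get? (PySem.Dict.mk preferences) g with
  | none => false
  | some p =>
    match PySem.List.pyGet? p 0 with
    | none => false
    | some p0 =>
      if mem p0 then
        match PySem.List.pyGet? p 1 with
        | none => false
        | some p1 => mem p1
      else false

-- the set B stores for seat i, and the clean insert-shape of B's build step
def isvsAdjSet (order : List String) (n i : Int) : PySem.Set String :=
  PySem.Set.ofList
    [(PySem.List.pyGet? order (i - 1)).getD "",
     (PySem.List.pyGet? order (PySem.Int.mod (i + 1) n)).getD ""]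

def isvsStepC (order : List String) (n : Int)
    (d : PySem.Dict String (PySem.Set String)) (q : Int × String) :
    PySem.Dict String (PySem.Set String) :=
  d.insert q.2
    (match d.get? q.2 with
     | some s => PySem.Set.inter s (isvsAdjSet order n q.1)
     | none => isvsAdjSet order n q.1)

-- left-fold of set intersection starting from an optional accumulator
def isvsMergeAll : Option (PySem.Set String) → List (PySem.Set String) → Option (PySem.Set String)
  | o, [] => o
  | none, s :: rest => isvsMergeAll (some s) rest
  | some t, s :: rest => isvsMergeAll (some (PySem.Set.inter t s)) rest

def isvsOc (o : Option (PySem.Set String)) (x : String) : Bool :=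
  match o with
  | none => false
  | some s => PySem.Set.contains s x

-- B's per-guest verification condition
def isvsBcond (neighbors : PySem.Dict String (PySem.Set String))
    (preferences : List (String × List String)) (g : String) : Bool :=
  match PySem.Dict.get? neighbors g with
  | none => false
  | some nb => isvsCond preferences g (fun x => PySem.Set.contains nb x)

-- ---- small generic facts ----

lemma isvs_contains_pair (l r x : String) :
    PySem.Set.contains (PySem.Set.ofList [l, r]) x = (x == l || x == r) := by
  rw [Bool.eq_iff_iff]
  simp [PySem.Set.mem_ofList]

lemma isvs_contains_inter (s t : PySem.Set String) (x : String) :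
    PySem.Set.contains (PySem.Set.inter s t) x
      = (PySem.Set.contains s x && PySem.Set.contains t x) := by
  rw [Bool.eq_iff_iff]
  simp [PySem.Set.mem_inter]

-- ---- index reading lemmas ----

lemma isvs_left_pair (order : List String) (k : Nat) (hk : k < order.length) :
    ∃ L, PySem.List.pyGet? order ((k : Int) - 1) = some L ∧
      PySem.List.pyGet? order (PySem.Int.mod ((k : Int) - 1) (order.length : Int)) = some L := by
  have hn : 0 < order.length := Nat.lt_of_le_of_lt (Nat.zero_le _) hk
  rcases Nat.eq_zero_or_pos k with h0 | h0
  · subst h0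
    refine ⟨order[order.length - 1]'(by omega), ?_, ?_⟩
    · simp only [Nat.cast_zero, zero_sub, PySem.List.pyGet?, PySem.List.pyIdx?]
      rw [if_neg (by omega), if_pos (by omega)]
      simp only [Option.bind_some]
      rw [List.getElem?_eq_getElem (by omega)]
      simp
    · have hm : PySem.Int.mod ((0 : Int) - 1) (order.length : Int) = (order.length : Int) - 1 := by
        simp only [PySem.Int.mod]
        rw [Int.fmod_eq_emod, if_pos (Or.inl (by omega)), add_zero]
        rw [show ((0 : Int) - 1)
            = (((order.length : Int) - 1) + (order.length : Int) * (-1)) from by ring]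
        rw [Int.add_mul_emod_self_left]
        exact Int.emod_eq_of_lt (by omega) (by omega)
      simp only [Nat.cast_zero] at hm ⊢
      rw [hm]
      simp only [PySem.List.pyGet?, PySem.List.pyIdx?]
      rw [if_pos (by omega), if_pos (by omega)]
      simp only [Option.bind_some]
      rw [show ((order.length : Int) - 1).toNat = order.length - 1 from by omega]
      exact List.getElem?_eq_getElem (by omega)
  · refine ⟨order[k - 1]'(by omega), ?_, ?_⟩
    · simp only [PySem.List.pyGet?, PySem.List.pyIdx?]
      rw [if_pos (by omega), if_pos (by omega)]
      simp only [Option.bind_some]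
      rw [show ((k : Int) - 1).toNat = k - 1 from by omega]
      exact List.getElem?_eq_getElem (by omega)
    · have hm : PySem.Int.mod ((k : Int) - 1) (order.length : Int) = (k : Int) - 1 := by
        simp only [PySem.Int.mod]
        rw [Int.fmod_eq_emod, if_pos (Or.inl (by omega)), add_zero]
        exact Int.emod_eq_of_lt (by omega) (by omega)
      rw [hm]
      simp only [PySem.List.pyGet?, PySem.List.pyIdx?]
      rw [if_pos (by omega), if_pos (by omega)]
      simp only [Option.bind_some]
      rw [show ((k : Int) - 1).toNat = k - 1 from by omega]
      exact List.getElem?_eq_getElem (by omega)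

lemma isvs_right_some (order : List String) (k : Nat) (hk : k < order.length) :
    ∃ R, PySem.List.pyGet? order (PySem.Int.mod ((k : Int) + 1) (order.length : Int)) = some R := by
  have hn : 0 < order.length := Nat.lt_of_le_of_lt (Nat.zero_le _) hk
  have hb : (0 : Int) ≤ PySem.Int.mod ((k : Int) + 1) (order.length : Int) ∧
      PySem.Int.mod ((k : Int) + 1) (order.length : Int) < (order.length : Int) := by
    simp only [PySem.Int.mod]
    rw [Int.fmod_eq_emod, if_pos (Or.inl (by omega)), add_zero]
    constructor
    · exact Int.emod_nonneg _ (by omega)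
    · exact Int.emod_lt_of_pos _ (by omega)
  refine ⟨order[(PySem.Int.mod ((k : Int) + 1) (order.length : Int)).toNat]'(by omega), ?_⟩
  simp only [PySem.List.pyGet?, PySem.List.pyIdx?]
  rw [if_pos hb.1, if_pos hb.2]
  simp only [Option.bind_some]
  rw [List.getElem?_eq_getElem (by omega)]

lemma isvs_self_some (order : List String) (k : Nat) (hk : k < order.length) :
    PySem.List.pyGet? order (k : Int) = some (order[k]'hk) := by
  rw [PySem.List.pyGet?_natCast]
  exact List.getElem?_eq_getElem hk

-- ---- A's loop as an "all" over the seats ----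

lemma isvsA_head (order : List String) (preferences : List (String × List String))
    (k : Nat) (hk : k < order.length) (rest : List Int) :
    isvsA_loop order preferences (order.length : Int) ((k : Int) :: rest)
      = (isvsCond preferences (order[k]'hk) (isvsMemPair order (order.length : Int) (k : Int))
          && isvsA_loop order preferences (order.length : Int) rest) := by
  obtain ⟨L, _, hLmod⟩ := isvs_left_pair order k hk
  obtain ⟨R, hR⟩ := isvs_right_some order k hk
  have hself := isvs_self_some order k hk
  simp only [isvsA_loop, isvsCond, isvsMemPair, hself, hLmod, hR]
  cases hdict : PySem.Dict.get? (PySem.Dict.mk preferences) (order[k]'hk) with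
  | none => simp
  | some p =>
    cases hp0 : PySem.List.pyGet? p 0 with
    | none => simp [hp0]
    | some p0 =>
      cases hc0 : (p0 == L || p0 == R) with
      | false => simp [hp0, hc0]
      | true =>
        cases hp1 : PySem.List.pyGet? p 1 with
        | none => simp [hp0, hc0, hp1]
        | some p1 =>
          cases hc1 : (p1 == L || p1 == R) <;> simp [hp0, hc0, hp1, hc1]

lemma isvsA_all (order : List String) (preferences : List (String × List String)) :
    ∀ k : Nat, k ≤ order.length →
      (isvsA_loop order preferences (order.length : Int)
          (PySem.List.pyRange (k : Int) (order.length : Int)) = true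
        ↔ ∀ j : Nat, k ≤ j → ∀ (hj : j < order.length),
            isvsCond preferences (order[j]'hj)
              (isvsMemPair order (order.length : Int) (j : Int)) = true) := by
  intro k hkle
  induction hm : order.length - k generalizing k with
  | zero =>
    have hk : k = order.length := by omega
    subst hk
    have h1 : PySem.List.pyRange (order.length : Int) (order.length : Int) = [] := by
      simp [PySem.List.pyRange]
    rw [h1]
    constructor
    · intro _ j hkj hj
      exact absurd hj (by omega)
    · intro _
      rfl
  | succ m ih =>
    have hk : k < order.length := by omega
    rw [PySem.List.pyRange_one_cons (by exact_mod_cast hk)]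
    rw [show ((k : Int) + 1) = ((k + 1 : Nat) : Int) from by push_cast; ring]
    rw [isvsA_head order preferences k hk, Bool.and_eq_true,
        ih (k + 1) (by omega) (by omega)]
    constructor
    · rintro ⟨h0, hrest⟩ j hkj hj
      rcases Nat.eq_or_lt_of_le hkj with rfl | hlt
      · exact h0
      · exact hrest j (by omega) hj
    · intro h
      exact ⟨h k le_rfl hk, fun j h1 hj => h j (by omega) hj⟩

-- ---- B's check as an "all" over the guests ----

lemma isvsB_head (neighbors : PySem.Dict String (PySem.Set String))
    (preferences : List (String × List String)) (g : String) (rest : List String) :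
    isvsB_check neighbors preferences (g :: rest)
      = (isvsBcond neighbors preferences g && isvsB_check neighbors preferences rest) := by
  simp only [isvsB_check, isvsBcond, isvsCond]
  cases hdict : PySem.Dict.get? (PySem.Dict.mk preferences) g with
  | none => cases hnb : PySem.Dict.get? neighbors g <;> simp
  | some p =>
    cases hnb : PySem.Dict.get? neighbors g with
    | none => simp
    | some nb =>
      cases hp0 : PySem.List.pyGet? p 0 with
      | none => simp [hp0]
      | some p0 =>
        by_cases hc0 : p0 ∈ nb
        · cases hp1 : PySem.List.pyGet? p 1 with
          | none => simp [hp0, hc0, hp1]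
          | some p1 =>
            by_cases hc1 : p1 ∈ nb <;> simp [hp0, hc0, hp1, hc1]
        · simp [hp0, hc0]

lemma isvsB_all (neighbors : PySem.Dict String (PySem.Set String))
    (preferences : List (String × List String)) (l : List String) :
    (isvsB_check neighbors preferences l = true
      ↔ ∀ g ∈ l, isvsBcond neighbors preferences g = true) := by
  induction l with
  | nil => simp [isvsB_check]
  | cons g rest ih =>
    rw [isvsB_head, Bool.and_eq_true, ih]
    simp

-- ---- the table's lookup ----

lemma isvsB_step_eq (order : List String) (q : Int × String)
    (hq : q ∈ PySem.List.enumerate order 0)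
    (d : PySem.Dict String (PySem.Set String)) :
    isvsB_step order (order.length : Int) d q = isvsStepC order (order.length : Int) d q := by
  rcases (PySem.List.mem_enumerate_iff order 0 q).mp hq with ⟨j, hj, rfl⟩
  obtain ⟨L, hL, _⟩ := isvs_left_pair order j hj
  obtain ⟨R, hR⟩ := isvs_right_some order j hj
  simp only [isvsB_step, isvsStepC, isvsAdjSet, zero_add, hL, hR, Option.getD_some]
  cases d.get? (order[j]'hj) <;> rfl

lemma isvsB_table_eq (order : List String) :
    isvsB_table order
      = (PySem.List.enumerate order 0).foldl (isvsStepC order (order.length : Int))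
          PySem.Dict.empty := by
  unfold isvsB_table
  exact PySem.List.foldl_congr_mem _ _ _ _ (fun acc q hq => isvsB_step_eq order q hq acc)

lemma isvs_fold_get (order : List String) (l : List (Int × String))
    (d : PySem.Dict String (PySem.Set String)) (g : String) :
    (l.foldl (isvsStepC order (order.length : Int)) d).get? g
      = isvsMergeAll (d.get? g)
          ((l.filter (fun q => q.2 == g)).map (fun q => isvsAdjSet order (order.length : Int) q.1)) := by
  induction l generalizing d with
  | nil => rfl
  | cons q rest ih =>
    rw [List.foldl_cons, ih]
    cases hq : (q.2 == g) with
    | false =>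
      have hne : g ≠ q.2 := fun h => by subst h; simp at hq
      rw [List.filter_cons_of_neg (by simp [hq])]
      simp only [isvsStepC, PySem.Dict.get?_insert_of_ne _ _ hne]
    | true =>
      have heq : q.2 = g := by simpa using hq
      rw [List.filter_cons_of_pos (by simp [hq]), List.map_cons]
      simp only [isvsStepC, heq, PySem.Dict.get?_insert_self]
      cases d.get? g <;> simp [isvsMergeAll]

lemma isvs_mergeAll_some (ss : List (PySem.Set String)) (t : PySem.Set String) :
    ∃ S, isvsMergeAll (some t) ss = some S := by
  induction ss generalizing t with
  | nil => exact ⟨t, rfl⟩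
  | cons s rest ih => exact ih (PySem.Set.inter t s)

lemma isvs_oc_mergeAll_some (ss : List (PySem.Set String)) (t : PySem.Set String) (x : String) :
    isvsOc (isvsMergeAll (some t) ss) x
      = (PySem.Set.contains t x && ss.all (fun s => PySem.Set.contains s x)) := by
  induction ss generalizing t with
  | nil => simp [isvsMergeAll, isvsOc]
  | cons s rest ih =>
    rw [show isvsMergeAll (some t) (s :: rest) = isvsMergeAll (some (PySem.Set.inter t s)) rest
        from rfl,
      ih (PySem.Set.inter t s), isvs_contains_inter]
    simp [Bool.and_assoc]

lemma isvs_oc_mergeAll_none (ss : List (PySem.Set String)) (x : String) (hne : ss ≠ []) :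
    isvsOc (isvsMergeAll none ss) x = ss.all (fun s => PySem.Set.contains s x) := by
  cases ss with
  | nil => exact absurd rfl hne
  | cons s rest =>
    rw [show isvsMergeAll none (s :: rest) = isvsMergeAll (some s) rest from rfl,
      isvs_oc_mergeAll_some]
    simp

-- expansion of the shared condition
lemma isvsCond_iff (preferences : List (String × List String)) (g : String) (mem : String → Bool) :
    isvsCond preferences g mem = true
      ↔ ∃ p, PySem.Dict.get? (PySem.Dict.mk preferences) g = some p ∧
          ∃ p0, PySem.List.pyGet? p 0 = some p0 ∧ mem p0 = true ∧
            ∃ p1, PySem.List.pyGet? p 1 = some p1 ∧ mem p1 = true := by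
  simp only [isvsCond]
  cases hdict : PySem.Dict.get? (PySem.Dict.mk preferences) g with
  | none => simp
  | some p =>
    cases hp0 : PySem.List.pyGet? p 0 with
    | none => simp [hp0]
    | some p0 =>
      cases hc0 : mem p0 with
      | false => simp [hp0, hc0]
      | true =>
        cases hp1 : PySem.List.pyGet? p 1 with
        | none => simp [hp0, hc0, hp1]
        | some p1 => simp [hp0, hc0, hp1]

-- B's condition at a guest of the seating, in terms of A's per-seat membership tests
lemma isvsBcond_char (order : List String) (preferences : List (String × List String))
    (g : String) (hg : g ∈ order) :
    isvsBcond (isvsB_table order) preferences g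
      = isvsCond preferences g (fun x =>
          ((PySem.List.enumerate order 0).filter (fun q => q.2 == g)).all
            (fun q => PySem.Set.contains (isvsAdjSet order (order.length : Int) q.1) x)) := by
  have hget : (isvsB_table order).get? g
      = isvsMergeAll none
          (((PySem.List.enumerate order 0).filter (fun q => q.2 == g)).map
            (fun q => isvsAdjSet order (order.length : Int) q.1)) := by
    rw [isvsB_table_eq, isvs_fold_get]
    rfl
  obtain ⟨k0, hk0, hgk⟩ := List.mem_iff_getElem.mp hg
  have hocc : ((k0 : Int), g) ∈ (PySem.List.enumerate order 0).filter (fun q => q.2 == g) := by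
    refine List.mem_filter.mpr ⟨?_, by simp⟩
    exact (PySem.List.mem_enumerate_iff order 0 _).mpr ⟨k0, hk0, by simp [hgk]⟩
  have hne : ((PySem.List.enumerate order 0).filter (fun q => q.2 == g)).map
      (fun q => isvsAdjSet order (order.length : Int) q.1) ≠ [] := by
    simp only [ne_eq, List.map_eq_nil_iff]
    exact List.ne_nil_of_mem hocc
  obtain ⟨S, hS⟩ : ∃ S, (isvsB_table order).get? g = some S := by
    rw [hget]
    cases hss : ((PySem.List.enumerate order 0).filter (fun q => q.2 == g)).map
        (fun q => isvsAdjSet order (order.length : Int) q.1) with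
    | nil => exact absurd hss hne
    | cons s rest =>
      rw [show isvsMergeAll none (s :: rest) = isvsMergeAll (some s) rest from rfl]
      exact isvs_mergeAll_some rest s
  have hSx : ∀ x, PySem.Set.contains S x
      = ((PySem.List.enumerate order 0).filter (fun q => q.2 == g)).all
          (fun q => PySem.Set.contains (isvsAdjSet order (order.length : Int) q.1) x) := by
    intro x
    have h1 : isvsOc ((isvsB_table order).get? g) x = PySem.Set.contains S x := by
      rw [hS]; rfl
    rw [← h1, hget, isvs_oc_mergeAll_none _ _ hne, List.all_map]
    rfl
  have hfun : (fun x => PySem.Set.contains S x)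
      = (fun x => ((PySem.List.enumerate order 0).filter (fun q => q.2 == g)).all
          (fun q => PySem.Set.contains (isvsAdjSet order (order.length : Int) q.1) x)) :=
    funext hSx
  simp only [isvsBcond, hS]
  rw [hfun]

-- adj-set membership at seat j IS A's membership test at seat j
lemma isvs_adj_mem (order : List String) (j : Nat) (hj : j < order.length) (x : String) :
    PySem.Set.contains (isvsAdjSet order (order.length : Int) (j : Int)) x
      = isvsMemPair order (order.length : Int) (j : Int) x := by
  obtain ⟨L, hL, hLmod⟩ := isvs_left_pair order j hj
  obtain ⟨R, hR⟩ := isvs_right_some order j hj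
  simp only [isvsAdjSet, isvsMemPair, hL, hLmod, hR, Option.getD_some, isvs_contains_pair]

-- ===== VERDICT (by name: the statement is the Claim_ definition above) =====
theorem is_valid_seating_spec : Claim_equal_is_valid_seating := by
  intro order preferences _hdom _hpre
  unfold Spec_is_valid_seating is_valid_seating is_valid_seating_alt
  have hA := isvsA_all order preferences 0 (Nat.zero_le _)
  simp only [Nat.cast_zero] at hA
  rw [Bool.eq_iff_iff, hA, isvsB_all]
  constructor
  · -- every seat satisfied → every guest's accumulated condition satisfied
    intro h g hg
    rw [isvsBcond_char order preferences g hg, isvsCond_iff]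
    obtain ⟨k0, hk0, hgk⟩ := List.mem_iff_getElem.mp hg
    have h0 := h k0 (Nat.zero_le _) hk0
    rw [hgk, isvsCond_iff] at h0
    obtain ⟨p, hp, p0, hp0, _, p1, hp1, _⟩ := h0
    have hocc : ∀ q ∈ (PySem.List.enumerate order 0).filter (fun q => q.2 == g),
        isvsMemPair order (order.length : Int) q.1 p0 = true ∧
        isvsMemPair order (order.length : Int) q.1 p1 = true := by
      intro q hq
      have hqm := List.mem_filter.mp hq
      rcases (PySem.List.mem_enumerate_iff order 0 q).mp hqm.1 with ⟨j, hjlt, rfl⟩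
      have hjg : order[j]'hjlt = g := by simpa using hqm.2
      have hAj := h j (Nat.zero_le _) hjlt
      rw [hjg, isvsCond_iff] at hAj
      obtain ⟨p', hp', p0', hp0', hm0', p1', hp1', hm1'⟩ := hAj
      rw [hp] at hp'
      obtain rfl : p = p' := Option.some.inj hp'
      rw [hp0] at hp0'
      obtain rfl : p0 = p0' := Option.some.inj hp0'
      rw [hp1] at hp1'
      obtain rfl : p1 = p1' := Option.some.inj hp1'
      simp only [zero_add]
      exact ⟨hm0', hm1'⟩
    refine ⟨p, hp, p0, hp0, ?_, p1, hp1, ?_⟩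
    · rw [List.all_eq_true]
      intro q hq
      have hqm := List.mem_filter.mp hq
      rcases (PySem.List.mem_enumerate_iff order 0 q).mp hqm.1 with ⟨j, hjlt, rfl⟩
      have hthis := (hocc _ hq).1
      simp only [zero_add] at hthis ⊢
      rw [isvs_adj_mem order j hjlt]
      exact hthis
    · rw [List.all_eq_true]
      intro q hq
      have hqm := List.mem_filter.mp hq
      rcases (PySem.List.mem_enumerate_iff order 0 q).mp hqm.1 with ⟨j, hjlt, rfl⟩
      have hthis := (hocc _ hq).2
      simp only [zero_add] at hthis ⊢
      rw [isvs_adj_mem order j hjlt]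
      exact hthis
  · -- every guest's accumulated condition satisfied → every seat satisfied
    intro h j _ hj
    have hg : order[j]'hj ∈ order := List.getElem_mem hj
    have hBg := h _ hg
    rw [isvsBcond_char order preferences _ hg, isvsCond_iff] at hBg
    obtain ⟨p, hp, p0, hp0, hm0, p1, hp1, hm1⟩ := hBg
    rw [isvsCond_iff]
    have hqmem : ((0 : Int) + (j : Int), order[j]'hj)
        ∈ (PySem.List.enumerate order 0).filter (fun q => q.2 == order[j]'hj) := by
      refine List.mem_filter.mpr ⟨?_, by simp⟩
      exact (PySem.List.mem_enumerate_iff order 0 _).mpr ⟨j, hj, rfl⟩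
    have hm0' : (((PySem.List.enumerate order 0).filter (fun q => q.2 == order[j]'hj)).all
        (fun q => PySem.Set.contains (isvsAdjSet order (order.length : Int) q.1) p0)) = true := hm0
    have hm1' : (((PySem.List.enumerate order 0).filter (fun q => q.2 == order[j]'hj)).all
        (fun q => PySem.Set.contains (isvsAdjSet order (order.length : Int) q.1) p1)) = true := hm1
    have h0 := (List.all_eq_true.mp hm0') _ hqmem
    have h1 := (List.all_eq_true.mp hm1') _ hqmem
    simp only [zero_add] at h0 h1
    rw [isvs_adj_mem order j hj] at h0 h1
    exact ⟨p, hp, p0, hp0, h0, p1, hp1, h1⟩
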